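-- pv_equiv track=rewrite | github.com/kaluginpeter/Algorithms_and_structures_tasks | Python_Solutions/CodeWars/6kyu/Simple_Fun_#208_Find_Sub_Array_With_Same_Element.py | find_subarray_with_same_element
-- ===== SOURCE A (Python) =====
-- def find_subarray_with_same_element(a, target):
--     if target not in a: return (-1, -1)
--     l, start, end, flag = [], 0, 0, False
--     for k, v in enumerate(a):
--         if v == target:
--             if not flag:
--                 start = k
--                 flag = True
--             if k == len(a) - 1: l.append((start, k))
--             continue
--         if flag:
--             l.append((start, k - 1))
--             start, end, flag = 0, 0, False
--     steps, top, s = [abs(i - j) for i, j in l], 0, 0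
--     for k, v in enumerate(steps):
--         if v >= s: top = k; s = v
--     return l[top]
-- ===== SOURCE B (Python) =====
-- def find_subarray_with_same_element(a, target):
--     best = (-1, -1)
--     best_len = 0
--     start = None
--     for k, v in enumerate(a):
--         if v == target:
--             if start is None:
--                 start = k
--         elif start is not None:
--             if k - start >= best_len:
--                 best, best_len = (start, k - 1), k - start
--             start = None
--     if start is not None and len(a) - start >= best_len:
--         best = (start, len(a) - 1)
--     return best
-- ===== Notes on version B (the rewrite author's own statement) =====
-- stated objective: simpler
-- what changed: Replaces A's three passes (membership test, collect all runs into a list, then an argmax scan over the run lengths) by a single pass that keeps only the current run's start and the best (run, length) so far, with >= so the rightmost longest run still wins.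
import Mathlib
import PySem

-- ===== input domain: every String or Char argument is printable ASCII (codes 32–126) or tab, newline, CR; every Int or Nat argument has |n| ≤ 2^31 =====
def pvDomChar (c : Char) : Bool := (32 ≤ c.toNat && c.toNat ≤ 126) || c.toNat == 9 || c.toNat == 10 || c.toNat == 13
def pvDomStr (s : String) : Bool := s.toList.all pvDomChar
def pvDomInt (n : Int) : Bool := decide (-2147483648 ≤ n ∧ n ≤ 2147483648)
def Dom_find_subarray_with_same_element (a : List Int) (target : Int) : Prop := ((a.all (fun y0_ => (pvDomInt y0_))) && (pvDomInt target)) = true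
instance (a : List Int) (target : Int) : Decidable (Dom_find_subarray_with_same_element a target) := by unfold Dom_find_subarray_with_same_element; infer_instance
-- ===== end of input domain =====

-- B replaces A's three passes (membership test, collecting every run into a list, argmax scan
-- over the run lengths) by one pass keeping only the current run's start and the best run so far
-- (objective: simpler, O(1) extra space).

-- ===== PORT A =====
-- loop body of A's first pass (state: l, start, end, flag)
def pvStepA (n target : Int)
    (acc : List (Int × Int) × Int × Int × Bool) (kv : Int × Int) :
    List (Int × Int) × Int × Int × Bool :=
  let l := acc.1
  let start := acc.2.1
  let e := acc.2.2.1
  let flag := acc.2.2.2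
  let k := kv.1
  let v := kv.2
  if v == target then
    let sf := if !flag then (k, true) else (start, flag)
    let l := if k == n - 1 then l ++ [(sf.1, k)] else l
    (l, sf.1, e, sf.2)
  else if flag then (l ++ [(start, k - 1)], 0, 0, false)
  else acc

-- loop body of A's second pass (argmax with >=, state: top, s)
def pvSelA (acc : Int × Int) (kv : Int × Int) : Int × Int :=
  if kv.2 ≥ acc.2 then (kv.1, kv.2) else acc

def find_subarray_with_same_element (a : List Int) (target : Int) : Int × Int :=
  if ¬ a.contains target then (-1, -1)
  else
    let st := (PySem.List.enumerate a 0).foldl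
      (pvStepA (PySem.List.len a) target) ([], 0, 0, false)
    let l := st.1
    let steps := l.map (fun ij => |ij.1 - ij.2|)
    let ts := (PySem.List.enumerate steps 0).foldl pvSelA (0, 0)
    -- l[top]: the index is always in range when this line is reached (l ≠ [] since target ∈ a);
    -- the default is never used
    PySem.List.pyGetD l ts.1 (-1, -1)

-- ===== PORT B =====
-- loop body of B (state: best, best_len, start)
def pvStepB (target : Int)
    (acc : (Int × Int) × Int × Option Int) (kv : Int × Int) :
    (Int × Int) × Int × Option Int :=
  if kv.2 == target then
    match acc.2.2 with
    | none => (acc.1, acc.2.1, some kv.1)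
    | some _ => acc
  else
    match acc.2.2 with
    | none => acc
    | some s =>
        if kv.1 - s ≥ acc.2.1 then ((s, kv.1 - 1), kv.1 - s, none)
        else (acc.1, acc.2.1, none)

def find_subarray_with_same_element_alt (a : List Int) (target : Int) : Int × Int :=
  let st := (PySem.List.enumerate a 0).foldl (pvStepB target) ((-1, -1), 0, none)
  match st.2.2 with
  | some s =>
      if PySem.List.len a - s ≥ st.2.1 then (s, PySem.List.len a - 1) else st.1
  | none => st.1

-- ===== PRECONDITION & SPEC =====
def Spec_find_subarray_with_same_element (a : List Int) (target : Int) (out : Int × Int) : Prop := out = find_subarray_with_same_element_alt a target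
instance (a : List Int) (target : Int) (out : Int × Int) : Decidable (Spec_find_subarray_with_same_element a target out) := by unfold Spec_find_subarray_with_same_element; infer_instance

-- ===== CLAIM (what is proved, stated in full; the proofs are below) =====
def Claim_equal_find_subarray_with_same_element : Prop := ∀ (a : List Int) (target : Int), Dom_find_subarray_with_same_element a target → Spec_find_subarray_with_same_element a target (find_subarray_with_same_element a target)

-- ===== LEMMAS AND PROOFS =====

-- A's second pass, as a function of the run list
def pvSteps (l : List (Int × Int)) : List Int := l.map (fun ij => |ij.1 - ij.2|)
def pvSel (xs : List Int) : Int × Int := (PySem.List.enumerate xs 0).foldl pvSelA (0, 0)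
def pvSmax (l : List (Int × Int)) : Int := (pvSel (pvSteps l)).2
def pvFinal (l : List (Int × Int)) : Int × Int := PySem.List.pyGetD l (pvSel (pvSteps l)).1 (-1, -1)
-- B's final step, as a function of the loop's end state
def pvFinishB (n : Int) (st : (Int × Int) × Int × Option Int) : Int × Int :=
  match st.2.2 with
  | some s => if n - s ≥ st.2.1 then (s, n - 1) else st.1
  | none => st.1

theorem pvSel_nil : pvSel [] = (0, 0) := rfl

theorem pvSel_snoc (xs : List Int) (x : Int) :
    pvSel (xs ++ [x]) = if x ≥ (pvSel xs).2 then ((xs.length : Int), x) else pvSel xs := by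
  unfold pvSel
  rw [PySem.List.enumerate_append, List.foldl_append]
  simp [PySem.List.enumerate_cons, PySem.List.enumerate_nil, pvSelA]

theorem pvSel_bounds (xs : List Int) :
    0 ≤ (pvSel xs).1 ∧ 0 ≤ (pvSel xs).2 ∧ (xs ≠ [] → (pvSel xs).1 < (xs.length : Int)) := by
  induction xs using List.reverseRecOn with
  | nil => simp [pvSel_nil]
  | append_singleton ys y ih =>
    rw [pvSel_snoc]
    by_cases h : y ≥ (pvSel ys).2
    · simp only [if_pos h]
      refine ⟨by positivity, by omega, fun _ => ?_⟩
      simp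
    · simp only [if_neg h]
      obtain ⟨h1, h2, h3⟩ := ih
      refine ⟨h1, h2, fun _ => ?_⟩
      rcases eq_or_ne ys [] with rfl | hne
      · simp [pvSel_nil]
      · have := h3 hne
        have hl : ((ys ++ [y]).length : Int) = (ys.length : Int) + 1 := by simp
        omega

theorem pvFinal_nil : pvFinal [] = (-1, -1) := rfl

theorem pvSnoc (l : List (Int × Int)) (i j : Int) (_hi : 0 ≤ i) (hij : i ≤ j) :
    pvFinal (l ++ [(i, j)]) = (if j - i ≥ pvSmax l then (i, j) else pvFinal l)
    ∧ pvSmax (l ++ [(i, j)]) = (if j - i ≥ pvSmax l then j - i else pvSmax l) := by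
  have hsteps : pvSteps (l ++ [(i, j)]) = pvSteps l ++ [j - i] := by
    simp [pvSteps]
    rw [abs_of_nonpos (by omega)]; ring
  have hlen : (pvSteps l).length = l.length := by simp [pvSteps]
  simp only [pvFinal, pvSmax, hsteps, pvSel_snoc, hlen]
  by_cases c : j - i ≥ (pvSel (pvSteps l)).2
  · simp only [if_pos c]
    refine ⟨?_, trivial⟩
    rw [PySem.List.pyGetD_natCast]
    simp [List.getD_eq_getElem?_getD]
  · have hne : pvSteps l ≠ [] := by
      intro h
      rw [h, pvSel_nil] at c
      simp at c
      omega
    have hlne : l ≠ [] := fun h => hne (by simp [pvSteps, h])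
    simp only [if_neg c]
    refine ⟨?_, trivial⟩
    obtain ⟨hb1, _, hb3⟩ := pvSel_bounds (pvSteps l)
    have htop : (pvSel (pvSteps l)).1 < (l.length : Int) := by
      have := hb3 hne; rw [hlen] at this; exact this
    rw [PySem.List.pyGetD_eq_getElem _ _ hb1 (by simp; omega),
        PySem.List.pyGetD_eq_getElem _ _ hb1 (by exact_mod_cast htop)]
    rw [List.getElem_append_left (by omega)]

-- B's loop is inert while no target occurs
theorem pvB_no_target (target : Int) (rest : List Int) :
    ∀ (s : Int) (best : Int × Int) (bl : Int), (∀ v ∈ rest, ¬ v = target) →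
    (PySem.List.enumerate rest s).foldl (pvStepB target) (best, bl, none) = (best, bl, none) := by
  induction rest with
  | nil => intro s best bl _; simp [PySem.List.enumerate_nil]
  | cons x t ih =>
    intro s best bl h
    rw [PySem.List.enumerate_cons, List.foldl_cons]
    have hx : ¬ x = target := h x (by simp)
    have : pvStepB target (best, bl, none) (s, x) = (best, bl, none) := by
      simp [pvStepB, hx]
    rw [this]
    exact ih (s + 1) best bl (fun v hv => h v (by simp [hv]))

-- the main simulation: A's run-collecting loop followed by its argmax pass computes
-- exactly B's single pass followed by B's close-out step
theorem pv_main (n target : Int) (rest : List Int) :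
    ∀ (s : Int) (l : List (Int × Int)) (start e : Int) (flag : Bool)
      (best : Int × Int) (bl : Int) (so : Option Int),
    0 ≤ s → s + (rest.length : Int) = n →
    (∀ p ∈ l, 0 ≤ p.1 ∧ p.1 ≤ p.2) →
    pvFinal l = best →
    bl = (if l = [] then 0 else pvSmax l + 1) →
    (flag = true → so = some start ∧ 0 ≤ start ∧ start < s ∧ s < n) →
    (flag = false → so = none) →
    pvFinal (((PySem.List.enumerate rest s).foldl (pvStepA n target) (l, start, e, flag)).1)
      = pvFinishB n ((PySem.List.enumerate rest s).foldl (pvStepB target) (best, bl, so)) := by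
  induction rest with
  | nil =>
    intro s l start e flag best bl so hs hlen hW hF hbl hft hff
    simp only [List.length_nil, Nat.cast_zero, add_zero] at hlen
    cases flag with
    | true =>
      obtain ⟨_, _, _, hsn⟩ := hft rfl
      omega
    | false =>
      rw [hff rfl]
      simp [PySem.List.enumerate_nil, pvFinishB, hF]
  | cons x t ih =>
    intro s l start e flag best bl so hs hlen hW hF hbl hft hff
    simp only [List.length_cons] at hlen
    rw [PySem.List.enumerate_cons, List.foldl_cons, List.foldl_cons]
    by_cases hx : x = target
    · -- current element is the target: open (or continue) a run
      have hxT : (x == target) = true := by simp [hx]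
      -- the run start after this step, on both sides
      have hsoB : pvStepB target (best, bl, so) (s, x)
          = (best, bl, some (if flag then start else s)) := by
        cases flag with
        | true => obtain ⟨h1, _, _, _⟩ := hft rfl; simp [pvStepB, hxT, h1]
        | false => simp [pvStepB, hxT, hff rfl]
      rcases eq_or_ne t ([] : List Int) with rfl | ht
      · -- last element of the array: A appends the closing run inside the loop
        have hsn : s = n - 1 := by simp at hlen; omega
        have hkT : (s == n - 1) = true := by simp [hsn]
        have hstA : pvStepA n target (l, start, e, flag) (s, x)
            = (l ++ [((if flag then start else s), s)], (if flag then start else s), e, true) := by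
          cases flag with
          | true => simp [pvStepA, hxT, hkT]
          | false => simp [pvStepA, hxT, hkT]
        rw [hstA, hsoB]
        simp only [PySem.List.enumerate_nil, List.foldl_nil]
        set st0 : Int := if flag = true then start else s with hst0def
        have h0a : 0 ≤ st0 := by
          rw [hst0def]; cases flag with
          | true => obtain ⟨_, h2, _, _⟩ := hft rfl; simpa using h2
          | false => simpa using hs
        have h0b : st0 ≤ s := by
          rw [hst0def]; cases flag with
          | true => obtain ⟨_, _, h3, _⟩ := hft rfl; simp; omega
          | false => simp
        obtain ⟨hsnoc, _⟩ := pvSnoc l st0 s h0a h0b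
        rw [hsnoc]
        simp only [pvFinishB]
        have hsm0 : pvSmax ([] : List (Int × Int)) = 0 := by simp [pvSmax, pvSteps, pvSel_nil]
        rcases eq_or_ne l ([] : List (Int × Int)) with rfl | hl
        · have hbl0 : bl = 0 := by simpa using hbl
          rw [if_pos (by rw [hsm0]; omega), if_pos (by omega), hsn]
        · have hbl1 : bl = pvSmax l + 1 := by rw [hbl, if_neg hl]
          by_cases c : s - st0 ≥ pvSmax l
          · rw [if_pos c, if_pos (by omega), hsn]
          · rw [if_neg c, if_neg (by omega), hF]
      · -- not the last element: no append on the target branch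
        have hkF : (s == n - 1) = false := by
          have : (1:Int) ≤ t.length := by exact_mod_cast Nat.one_le_iff_ne_zero.mpr (by simpa using ht)
          simp; omega
        have hstA : pvStepA n target (l, start, e, flag) (s, x)
            = (l, (if flag then start else s), e, true) := by
          cases flag with
          | true => simp [pvStepA, hxT, hkF]
          | false => simp [pvStepA, hxT, hkF]
        rw [hstA, hsoB]
        apply ih (s + 1) l _ e true best bl _ (by omega) (by push_cast at hlen; omega) hW hF hbl
        · intro _
          refine ⟨rfl, ?_, ?_, ?_⟩
          · cases flag with
            | true => obtain ⟨_, h2, _, _⟩ := hft rfl; simpa using h2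
            | false => simpa using hs
          · cases flag with
            | true => obtain ⟨_, _, h3, _⟩ := hft rfl; simp; omega
            | false => simp
          · have : (1:Int) ≤ t.length := by exact_mod_cast Nat.one_le_iff_ne_zero.mpr (by simpa using ht)
            push_cast at hlen; omega
        · intro h; cases h
    · -- current element is not the target
      have hxF : (x == target) = false := by simp [hx]
      cases flag with
      | false =>
        have hstA : pvStepA n target (l, start, e, false) (s, x) = (l, start, e, false) := by
          simp [pvStepA, hxF]
        have hstB : pvStepB target (best, bl, so) (s, x) = (best, bl, none) := by
          simp [pvStepB, hxF, hff rfl]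
        rw [hstA, hstB]
        apply ih (s + 1) l start e false best bl none (by omega)
          (by push_cast at hlen; omega) hW hF hbl (by intro h; cases h) (fun _ => rfl)
      | true =>
        obtain ⟨hso, h0s, hss, _⟩ := hft rfl
        -- A closes the run (start, s-1); B updates the best run with the same test
        have hstA : pvStepA n target (l, start, e, true) (s, x)
            = (l ++ [(start, s - 1)], 0, 0, false) := by
          simp [pvStepA, hxF]
        obtain ⟨hsnoc, hsmax⟩ := pvSnoc l start (s - 1) h0s (by omega)
        have hcond : (s - start ≥ bl) ↔ ((s - 1) - start ≥ pvSmax l) := by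
          rcases eq_or_ne l ([] : List (Int × Int)) with rfl | hl
          · have hbl0 : bl = 0 := by simpa using hbl
            have : pvSmax ([] : List (Int × Int)) = 0 := by simp [pvSmax, pvSteps, pvSel_nil]
            constructor <;> intro <;> omega
          · have hbl1 : bl = pvSmax l + 1 := by rw [hbl, if_neg hl]
            constructor <;> intro <;> omega
        have hstB : pvStepB target (best, bl, some start) (s, x)
            = ((if s - start ≥ bl then (start, s - 1) else best),
               (if s - start ≥ bl then s - start else bl), none) := by
          by_cases c : s - start ≥ bl
          · simp [pvStepB, hxF, c]
          · simp [pvStepB, hxF, c]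
        rw [hstA, hso, hstB]
        apply ih (s + 1) (l ++ [(start, s - 1)]) 0 0 false _ _ none (by omega)
          (by push_cast at hlen; omega)
        · intro p hp
          rcases List.mem_append.mp hp with h | h
          · exact hW p h
          · simp at h; rw [h]; constructor <;> simp <;> omega
        · rw [hsnoc]
          by_cases c : s - start ≥ bl
          · rw [if_pos c, if_pos (hcond.mp c)]
          · rw [if_neg c, if_neg (fun hc => c (hcond.mpr hc)), hF]
        · have hne : l ++ [(start, s - 1)] ≠ [] := by simp
          rw [if_neg hne, hsmax]
          by_cases c : s - start ≥ bl
          · rw [if_pos c, if_pos (hcond.mp c)]; omega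
          · rw [if_neg c, if_neg (fun hc => c (hcond.mpr hc)), hbl]
            rcases eq_or_ne l ([] : List (Int × Int)) with rfl | hl
            · exfalso
              have hbl0 : bl = 0 := by simpa using hbl
              have : pvSmax ([] : List (Int × Int)) = 0 := by simp [pvSmax, pvSteps, pvSel_nil]
              omega
            · rw [if_neg hl]
        · intro h; cases h
        · intro _; rfl

-- ===== VERDICT (by name: the statement is the Claim_ definition above) =====
theorem find_subarray_with_same_element_spec : Claim_equal_find_subarray_with_same_element := by
  intro a target _
  unfold Spec_find_subarray_with_same_element
  rw [find_subarray_with_same_element, find_subarray_with_same_element_alt]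
  by_cases h : target ∈ a
  · rw [if_neg (by simp [h])]
    have := pv_main (PySem.List.len a) target a 0 [] 0 0 false (-1, -1) 0 none
      (le_refl 0) (by simp) (by simp) pvFinal_nil (by simp) (by intro hc; cases hc) (fun _ => rfl)
    simpa [pvFinal, pvSel, pvSteps, pvFinishB] using this
  · rw [if_pos (by simp [h])]
    rw [pvB_no_target target a 0 (-1, -1) 0 (fun v hv => by rintro rfl; exact h hv)]
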